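-- pv_equiv track=rewrite | github.com/Charan-013/Coding-ProblemSolving-using-Python | week 9/Day36/TrackWebsite-student/solution.py | trackWebsite
-- ===== SOURCE A (Python) =====
-- def trackWebsite(l):
--     d = {}
--     for name,website in l:
--         if name not in d:
--             d[name] = [website]
--         else:
--             d[name].append(website)
--     return d
-- ===== SOURCE B (Python) =====
-- def trackWebsite(l):
--     names = list(dict.fromkeys(n for n, _ in l))
--     return {name: [w for n, w in l if n == name] for name in names}
-- ===== Notes on version B (the rewrite author's own statement) =====
-- stated objective: alternative
-- what changed: Replaces A's single accumulating dict-building pass with a build-the-distinct-key-list-then-scan strategy: first the ordered distinct names, then a dict comprehension that collects each name's websites by scanning the input.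
import Mathlib
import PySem

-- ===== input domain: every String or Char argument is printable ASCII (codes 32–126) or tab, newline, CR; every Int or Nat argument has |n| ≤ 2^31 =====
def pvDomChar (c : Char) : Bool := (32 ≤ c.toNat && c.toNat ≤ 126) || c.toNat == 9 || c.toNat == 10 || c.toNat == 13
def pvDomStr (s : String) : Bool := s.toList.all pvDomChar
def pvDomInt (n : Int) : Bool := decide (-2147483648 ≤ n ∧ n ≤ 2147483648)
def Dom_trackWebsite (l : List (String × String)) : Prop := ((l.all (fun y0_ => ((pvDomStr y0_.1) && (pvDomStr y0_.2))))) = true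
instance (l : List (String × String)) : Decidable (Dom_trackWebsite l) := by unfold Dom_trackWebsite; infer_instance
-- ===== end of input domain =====

-- B groups by first computing the ordered distinct names and then scanning the input once per
-- name (a different decomposition of the same grouping; same key/value order as A).

-- ===== PORT A =====
-- single pass: d = {}; for name, website in l: if name not in d: d[name] = [website] else: d[name].append(website)
def trackWebsite (l : List (String × String)) : List (String × List String) :=
  (l.foldl (fun d p =>
      if d.contains p.1 = false then d.insert p.1 [p.2]
      else d.modify p.1 [] (fun ws => ws ++ [p.2]))
    PySem.Dict.empty).items

-- ===== PORT B =====
-- names = list(dict.fromkeys(n for n, _ in l)); {name: [w for n, w in l if n == name] for name in names}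
def trackWebsite_alt (l : List (String × String)) : List (String × List String) :=
  (PySem.Set.ofList (l.map (·.1))).map
    (fun name => (name, (l.filter (fun p => p.1 == name)).map (·.2)))

-- ===== PRECONDITION & SPEC =====
def Spec_trackWebsite (l : List (String × String)) (out : List (String × List String)) : Prop := out = trackWebsite_alt l
instance (l : List (String × String)) (out : List (String × List String)) : Decidable (Spec_trackWebsite l out) := by unfold Spec_trackWebsite; infer_instance

-- ===== CLAIM (what is proved, stated in full; the proofs are below) =====
def Claim_equal_trackWebsite : Prop := ∀ (l : List (String × String)), Dom_trackWebsite l → Spec_trackWebsite l (trackWebsite l)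

-- ===== LEMMAS AND PROOFS =====

-- A's branch is extensionally one `modify` step (insert on a fresh key = modify with default [])
theorem trackWebsite_step_eq (d : PySem.Dict String (List String)) (p : String × String) :
    (if d.contains p.1 = false then d.insert p.1 [p.2]
     else d.modify p.1 [] (fun ws => ws ++ [p.2]))
    = d.modify p.1 [] (fun ws => ws ++ [p.2]) := by
  by_cases h : d.contains p.1 = false
  · rw [PySem.Dict.modify, PySem.Dict.getD_of_not_contains (h := h)]
    simp
  · simp [h]

-- ===== VERDICT (by name: the statement is the Claim_ definition above) =====
theorem trackWebsite_spec : Claim_equal_trackWebsite := by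
  intro l _
  unfold Spec_trackWebsite trackWebsite trackWebsite_alt
  have hfold : l.foldl (fun d p =>
      if d.contains p.1 = false then d.insert p.1 [p.2]
      else d.modify p.1 [] (fun ws => ws ++ [p.2])) PySem.Dict.empty
      = l.foldl (fun d p => d.modify p.1 [] (fun ws => ws ++ [p.2])) PySem.Dict.empty := by
    apply PySem.List.foldl_congr_mem
    intro d p _
    exact trackWebsite_step_eq d p
  rw [hfold]
  set D := l.foldl (fun d p => d.modify p.1 [] (fun ws => ws ++ [p.2])) PySem.Dict.empty with hD
  have hnd : D.keys.Nodup := by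
    exact PySem.Dict.nodup_keys_foldl_modify_key l (·.1) [] (fun d p => fun ws => ws ++ [p.2]) _
      PySem.Dict.nodup_keys_empty
  have hkeys : D.keys = PySem.Set.ofList (l.map (·.1)) := by
    rw [hD, PySem.Dict.keys_foldl_modify_key, PySem.Dict.keys_empty, PySem.Set.update_nil_left]
  have hitems := PySem.Dict.items_eq_map_keys D hnd []
  rw [hitems, hkeys]
  refine List.map_congr_left ?_
  intro n _
  have := PySem.Dict.getD_foldl_modify_append l PySem.Dict.empty n
  simp only [← hD] at this
  simp [this]
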